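-- pv_equiv track=rewrite | github.com/gouyeonch/Algorithm | 프로그래머스/2/12902. 3 x n 타일링/3 x n 타일링.py | solution
-- ===== SOURCE A (Python) =====
-- def solution(n):
--     if n%2==1:
--         return 0
--
--     dp = [0,0,(1,0),0,(3,1),0]
--     for i in range(6, n+1):
--         if i%2 == 1:
--             dp.append(0)
--         else:
--             dd = (dp[i-2][0]*3)%1000000007 + (dp[i-2][1]*2)%1000000007
--             pp = (dp[i-2][0])%1000000007 + (dp[i-2][1])%1000000007
--             dp.append((dd,pp))
--     return (dp[n][0]*3 + dp[n][1]*2)%1000000007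
-- ===== SOURCE B (Python) =====
-- def solution(n):
--     # Count 3 x n tilings mod 1e9+7 via fast matrix exponentiation of
--     # f(k) = 4*f(k-1) - f(k-2) on k = n//2 (f(0)=1, f(1)=3): O(log n).
--     if n % 2:
--         return 0
--     MOD = 1000000007
--
--     def mul(x, y):
--         return (
--             (x[0] * y[0] + x[1] * y[2]) % MOD,
--             (x[0] * y[1] + x[1] * y[3]) % MOD,
--             (x[2] * y[0] + x[3] * y[2]) % MOD,
--             (x[2] * y[1] + x[3] * y[3]) % MOD,
--         )
--
--     r = (1, 0, 0, 1)
--     p = (4, MOD - 1, 1, 0)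
--     e = n // 2
--     while e > 0:
--         if e & 1:
--             r = mul(r, p)
--         p = mul(p, p)
--         e >>= 1
--     # bottom row of p0^(n//2) applied to (f(1), f(0)) = (3, 1) gives f(n//2)
--     return (r[2] * 3 + r[3]) % MOD
-- ===== Notes on version B (the rewrite author's own statement) =====
-- stated objective: faster
-- what changed: Replaces A's O(n) DP that builds a list of (dd,pp) tuples with O(log n) binary exponentiation of the 2x2 matrix of the linear recurrence f(k)=4f(k-1)-f(k-2) on k=n//2.
-- intended difference: On n = -2 and n = -4 — the only even negative inputs A survives — A returns values read accidentally from the seed list via Python's negative-index wraparound, while B returns the recurrence's base value of one (identity matrix power for nonpositive exponents); negative n is an unspecified corner and B's value is the principled one. — e.g. on solution(-2): A returns 11, B returns 1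
-- crash fix: On n = 0 and on even negative inputs past the seed list A raises TypeError or IndexError; B returns the recurrence's base value of one. — e.g. on solution(0): A raises TypeError, B returns 1
import Mathlib
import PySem

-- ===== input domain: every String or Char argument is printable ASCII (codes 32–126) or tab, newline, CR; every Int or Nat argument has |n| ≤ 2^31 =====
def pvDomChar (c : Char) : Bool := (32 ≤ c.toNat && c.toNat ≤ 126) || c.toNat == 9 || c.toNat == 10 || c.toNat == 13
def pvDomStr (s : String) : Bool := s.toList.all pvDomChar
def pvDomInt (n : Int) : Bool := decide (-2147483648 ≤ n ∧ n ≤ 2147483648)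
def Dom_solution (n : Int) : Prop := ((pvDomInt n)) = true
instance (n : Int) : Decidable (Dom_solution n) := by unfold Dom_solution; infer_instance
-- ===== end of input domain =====

-- B replaces A's O(n) tuple-list DP by binary exponentiation of the 2×2 matrix of the
-- recurrence f(k) = 4f(k-1) - f(k-2) on k = n//2 (objective: faster, asymptotically).

-- ===== PORT A =====
-- Python's `%` here always has the positive divisors 2 and 1000000007, where Int.emod
-- is exact (Python floor mod = emod for a positive divisor).
-- dp mixes the int 0 and pairs: ported as Option (Int × Int), `none` = the int 0.
-- loop body of A's `for i in range(6, n+1)`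
def aStep (dp : List (Option (Int × Int))) (i : Int) : List (Option (Int × Int)) :=
  if i % 2 == 1 then dp ++ [none]
  else
    match PySem.List.pyGet? dp (i - 2) with
    | some (some (a, b)) =>
        let dd := (a * 3) % 1000000007 + (b * 2) % 1000000007
        let pp := a % 1000000007 + b % 1000000007
        dp ++ [some (dd, pp)]
    | _ => dp ++ [none]  -- dp[i-2] is the int 0: Python would raise; unreachable for i ≥ 6

def solution (n : Int) : Int :=
  if n % 2 == 1 then 0
  else
    -- dp = the initial Python list, then the loop; return dp[n] combined
    match PySem.List.pyGet?
        ((PySem.List.pyRange 6 (n + 1) 1).foldl aStep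
          [none, none, some (1, 0), none, some (3, 1), none]) n with
    | some (some (a, b)) => (a * 3 + b * 2) % 1000000007
    | _ => 0  -- dp[n] is the int 0 or out of range: Python raises; outside Pre_solution

-- ===== PORT B =====
-- 2×2 matrices as flat 4-tuples, as in Source B; x[0],x[1],x[2],x[3] = .1,.2.1,.2.2.1,.2.2.2
def altMul (x y : Int × Int × Int × Int) : Int × Int × Int × Int :=
  ((x.1 * y.1 + x.2.1 * y.2.2.1) % 1000000007,
   (x.1 * y.2.1 + x.2.1 * y.2.2.2) % 1000000007,
   (x.2.2.1 * y.1 + x.2.2.2 * y.2.2.1) % 1000000007,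
   (x.2.2.1 * y.2.1 + x.2.2.2 * y.2.2.2) % 1000000007)

-- Source B's `while e > 0` loop; `e & 1` = PySem.Int.band, `e >>= 1` = floor division by 2
def altLoop (r p : Int × Int × Int × Int) (e : Int) : Int × Int × Int × Int :=
  if _h0 : 0 < e then
    altLoop (if PySem.Int.band e 1 != 0 then altMul r p else r)
      (altMul p p) (PySem.Int.floordiv e 2)
  else r
termination_by e.toNat
decreasing_by
  rw [PySem.Int.floordiv_eq_ediv_of_pos (by omega)]
  omega

def solution_alt (n : Int) : Int :=
  if n % 2 != 0 then 0
  else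
    ((altLoop (1, 0, 0, 1) (4, 1000000007 - 1, 1, 0) (PySem.Int.floordiv n 2)).2.2.1 * 3 +
      (altLoop (1, 0, 0, 1) (4, 1000000007 - 1, 1, 0) (PySem.Int.floordiv n 2)).2.2.2) % 1000000007

-- ===== PRECONDITION & SPEC =====
-- Pre_ excludes exactly the inputs where A raises: n = 0 and even negative inputs
-- past the seed list (there dp[n] is the int 0, or out of range).
def Pre_solution (n : Int) : Prop := n % 2 = 1 ∨ 2 ≤ n ∨ n = -2 ∨ n = -4
instance (n : Int) : Decidable (Pre_solution n) := by unfold Pre_solution; infer_instance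
def pvWitness_solution : Int := 6

-- On n = -2 and n = -4 A returns accidental negative-index reads of the seed list;
-- B returns the recurrence's base value of one — the principled choice on this
-- unspecified corner.
def D_solution (n : Int) : Prop := n = -2 ∨ n = -4
instance (n : Int) : Decidable (D_solution n) := by unfold D_solution; infer_instance

-- On n = 0 and on even negative inputs past the seed list A raises (TypeError /
-- IndexError); B returns the recurrence's base value of one (solution_raises below).
def Raises_solution (n : Int) : Prop := n % 2 = 0 ∧ (n = 0 ∨ n ≤ -6)
instance (n : Int) : Decidable (Raises_solution n) := by unfold Raises_solution; infer_instance
def pvRaiseWitness_solution : Int := 0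
def pvRaiseWitnessOut_solution : Int := 1

def Spec_solution (n : Int) (out : Int) : Prop := ¬ D_solution n → out = solution_alt n
instance (n : Int) (out : Int) : Decidable (Spec_solution n out) := by unfold Spec_solution; infer_instance

def pvDiffWitness_solution : Int := -2
def pvDiffWitnessOut_solution : Int × Int := (11, 1)

-- ===== CLAIM (what is proved, stated in full; the proofs are below) =====
def Claim_unchanged_solution : Prop := ∀ (n : Int), Dom_solution n → Pre_solution n → Spec_solution n (solution n)
def Claim_changed_solution : Prop := Dom_solution (pvDiffWitness_solution) ∧ Pre_solution (pvDiffWitness_solution) ∧ D_solution (pvDiffWitness_solution) ∧ solution (pvDiffWitness_solution) = pvDiffWitnessOut_solution.1 ∧ solution_alt (pvDiffWitness_solution) = pvDiffWitnessOut_solution.2 ∧ pvDiffWitnessOut_solution.1 ≠ pvDiffWitnessOut_solution.2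
def Claim_exact_solution : Prop := ∀ (n : Int), Dom_solution n → Pre_solution n → D_solution n → solution n ≠ solution_alt n
def Claim_raises_solution : Prop := (∀ (n : Int), Dom_solution n → Raises_solution n → ¬ Pre_solution n) ∧ (Dom_solution (pvRaiseWitness_solution) ∧ Raises_solution (pvRaiseWitness_solution) ∧ solution_alt (pvRaiseWitness_solution) = pvRaiseWitnessOut_solution)

-- ===== LEMMAS AND PROOFS =====

-- the mathematical sequence: F k = number of 3×(2k) tilings (exact integers, no mod)
def F : Nat → Int
  | 0 => 1
  | 1 => 3
  | (k + 2) => 4 * F (k + 1) - F k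

-- A's tuple state: dpA k = the pair A stores at dp[2k+2]
def dpA : Nat → Int × Int
  | 0 => (1, 0)
  | k + 1 =>
      let a := (dpA k).1
      let b := (dpA k).2
      ((a * 3) % 1000000007 + (b * 2) % 1000000007, a % 1000000007 + b % 1000000007)

def entryA (j : Nat) : Option (Int × Int) :=
  if j % 2 = 0 ∧ 2 ≤ j then some (dpA (j / 2 - 1)) else none

def dpFull (m : Nat) : List (Option (Int × Int)) := (List.range (m + 1)).map entryA

theorem dpA_modEq (k : Nat) :
    (dpA k).1 ≡ F k [ZMOD 1000000007] ∧
    3 * F k + 2 * (dpA k).2 ≡ F (k + 1) [ZMOD 1000000007] := by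
  induction k with
  | zero => constructor <;> decide
  | succ k ih =>
      obtain ⟨h1, h2⟩ := ih
      have hm : ∀ x : Int, x % 1000000007 ≡ x [ZMOD 1000000007] :=
        fun x => Int.emod_emod_of_dvd x dvd_rfl
      constructor
      · show (dpA k).1 * 3 % 1000000007 + (dpA k).2 * 2 % 1000000007 ≡ F (k + 1) [ZMOD 1000000007]
        calc (dpA k).1 * 3 % 1000000007 + (dpA k).2 * 2 % 1000000007
            ≡ (dpA k).1 * 3 + (dpA k).2 * 2 [ZMOD 1000000007] := (hm _).add (hm _)
          _ ≡ F k * 3 + (dpA k).2 * 2 [ZMOD 1000000007] := ((h1.mul_right 3).add_right _)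
          _ = 3 * F k + 2 * (dpA k).2 := by ring
          _ ≡ F (k + 1) [ZMOD 1000000007] := h2
      · show 3 * F (k + 1) + 2 * ((dpA k).1 % 1000000007 + (dpA k).2 % 1000000007) ≡
            F (k + 2) [ZMOD 1000000007]
        have hd : (dpA k).1 % 1000000007 + (dpA k).2 % 1000000007 ≡
            F k + (dpA k).2 [ZMOD 1000000007] := (hm _).add (hm _) |>.trans (h1.add_right _)
        calc 3 * F (k + 1) + 2 * ((dpA k).1 % 1000000007 + (dpA k).2 % 1000000007)
            ≡ 3 * F (k + 1) + 2 * (F k + (dpA k).2) [ZMOD 1000000007] :=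
              (hd.mul_left 2).add_left _
          _ = 3 * F (k + 1) + (3 * F k + 2 * (dpA k).2) - F k := by ring
          _ ≡ 3 * F (k + 1) + F (k + 1) - F k [ZMOD 1000000007] :=
              Int.ModEq.sub (h2.add_left _) (Int.ModEq.refl _)
          _ = F (k + 2) := by show _ = 4 * F (k + 1) - F k; ring

theorem loop_eq (m : Nat) (h : 5 ≤ m) :
    (PySem.List.pyRange 6 ((m : Int) + 1) 1).foldl aStep
      [none, none, some (1, 0), none, some (3, 1), none] = dpFull m := by
  induction m, h using Nat.le_induction with
  | base =>
      rw [show ((5 : Nat) : Int) + 1 = 6 by norm_num, PySem.List.pyRange_one_eq_nil (by norm_num)]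
      decide
  | succ m hm ih =>
      have hstep : (PySem.List.pyRange 6 ((m : Int) + 1 + 1) 1) =
          (PySem.List.pyRange 6 ((m : Int) + 1) 1) ++ [(m : Int) + 1] :=
        PySem.List.pyRange_one_succ_right (by omega)
      rw [show (((m + 1 : Nat)) : Int) + 1 = ((m : Int) + 1) + 1 by push_cast; ring, hstep,
        List.foldl_append, ih]
      -- one step: aStep (dpFull m) (m+1) = dpFull (m+1)
      have hlen : (dpFull m).length = m + 1 := by
        simp [dpFull]
      have happ : dpFull (m + 1) = dpFull m ++ [entryA (m + 1)] := by
        simp [dpFull, List.range_succ]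
      have hget : PySem.List.pyGet? (dpFull m) ((m : Int) + 1 - 2) = some (entryA (m - 1)) := by
        have : ((m : Int) + 1 - 2) = ((m - 1 : Nat) : Int) := by push_cast [Nat.cast_sub (by omega : 1 ≤ m)]; ring
        rw [this, PySem.List.pyGet?_natCast]
        simp only [dpFull, List.getElem?_map, List.getElem?_range (by omega : m - 1 < m + 1),
          Option.map_some]
      rcases Nat.even_or_odd (m + 1) with he | ho
      · -- m+1 even: i = m+1, i % 2 == 1 is false, dp[i-2] = entryA (m-1) = some (dpA _)
        have hmod : ((m : Int) + 1) % 2 = 0 := by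
          obtain ⟨t, ht⟩ := he; omega
        have hm1 : (m - 1) % 2 = 0 ∧ 2 ≤ m - 1 := by
          obtain ⟨t, ht⟩ := he; omega
        have hentry : entryA (m - 1) = some (dpA ((m - 1) / 2 - 1)) := by
          simp [entryA, hm1.1, hm1.2]
        rw [List.foldl_cons, List.foldl_nil, aStep.eq_def, if_neg (show ¬(((m : Int) + 1) % 2 == 1) = true by simp [hmod]),
          hget, hentry, happ]
        have hE : entryA (m + 1) = some (dpA ((m - 1) / 2 - 1 + 1)) := by
          have h1 : (m + 1) % 2 = 0 := by obtain ⟨t, ht⟩ := he; omega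
          have h2 : (m + 1) / 2 - 1 = (m - 1) / 2 - 1 + 1 := by
            obtain ⟨t, ht⟩ := he; omega
          simp [entryA, h1, h2]
          omega
        rw [hE]
        simp [dpA]
      · -- m+1 odd: append none
        have hmod : ((m : Int) + 1) % 2 = 1 := by
          obtain ⟨t, ht⟩ := ho; omega
        rw [List.foldl_cons, List.foldl_nil, aStep.eq_def, if_pos (show (((m : Int) + 1) % 2 == 1) = true by simp [hmod]), happ]
        have : entryA (m + 1) = none := by
          have : (m + 1) % 2 = 1 := by obtain ⟨t, ht⟩ := ho; omega
          simp [entryA, this]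
        rw [this]

theorem solA (k : Nat) :
    solution (2 * (k : Int) + 2) = F (k + 1) % 1000000007 := by
  have hmod : (2 * (k : Int) + 2) % 2 = 0 := by omega
  rw [solution, if_neg (by simp [hmod])]
  match k with
  | 0 => decide
  | 1 => decide
  | (j + 2) =>
      have h5 : 5 ≤ 2 * (j + 2) + 2 := by omega
      have hcast : (2 * ((j + 2 : Nat) : Int) + 2) + 1 = ((2 * (j + 2) + 2 : Nat) : Int) + 1 := by
        push_cast; ring
      rw [hcast, loop_eq _ h5]
      have hget : PySem.List.pyGet? (dpFull (2 * (j + 2) + 2)) (2 * ((j + 2 : Nat) : Int) + 2) =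
          some (entryA (2 * (j + 2) + 2)) := by
        have : (2 * ((j + 2 : Nat) : Int) + 2) = ((2 * (j + 2) + 2 : Nat) : Int) := by push_cast; ring
        rw [this, PySem.List.pyGet?_natCast]
        simp only [dpFull, List.getElem?_map,
          List.getElem?_range (by omega : 2 * (j + 2) + 2 < 2 * (j + 2) + 2 + 1), Option.map_some]
      have hE : entryA (2 * (j + 2) + 2) = some (dpA (j + 2)) := by
        have h1 : (2 * (j + 2) + 2) % 2 = 0 := by omega
        simp [entryA, h1]
      rw [hget, hE]
      -- (a*3 + b*2) % M = F (k+1) % M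
      obtain ⟨h1, h2⟩ := dpA_modEq (j + 2)
      have : (dpA (j + 2)).1 * 3 + (dpA (j + 2)).2 * 2 ≡ F (j + 2 + 1) [ZMOD 1000000007] := by
        calc (dpA (j + 2)).1 * 3 + (dpA (j + 2)).2 * 2
            ≡ F (j + 2) * 3 + (dpA (j + 2)).2 * 2 [ZMOD 1000000007] := (h1.mul_right 3).add_right _
          _ = 3 * F (j + 2) + 2 * (dpA (j + 2)).2 := by ring
          _ ≡ F (j + 2 + 1) [ZMOD 1000000007] := h2
      exact this

-- ===== B-side: exact 2×2 matrix arithmetic =====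
def mulE (x y : Int × Int × Int × Int) : Int × Int × Int × Int :=
  (x.1 * y.1 + x.2.1 * y.2.2.1,
   x.1 * y.2.1 + x.2.1 * y.2.2.2,
   x.2.2.1 * y.1 + x.2.2.2 * y.2.2.1,
   x.2.2.1 * y.2.1 + x.2.2.2 * y.2.2.2)

def powE (p : Int × Int × Int × Int) : Nat → Int × Int × Int × Int
  | 0 => (1, 0, 0, 1)
  | (k + 1) => mulE p (powE p k)

-- entrywise congruence mod 1e9+7
def MC (x y : Int × Int × Int × Int) : Prop :=
  x.1 ≡ y.1 [ZMOD 1000000007] ∧ x.2.1 ≡ y.2.1 [ZMOD 1000000007] ∧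
  x.2.2.1 ≡ y.2.2.1 [ZMOD 1000000007] ∧ x.2.2.2 ≡ y.2.2.2 [ZMOD 1000000007]

theorem mulE_assoc (x y z : Int × Int × Int × Int) : mulE (mulE x y) z = mulE x (mulE y z) := by
  obtain ⟨a, b, c, d⟩ := x; obtain ⟨e, f, g, h⟩ := y; obtain ⟨i, j, k, l⟩ := z
  simp only [mulE, Prod.mk.injEq]
  refine ⟨by ring, by ring, by ring, by ring⟩

theorem mulE_one_left (x : Int × Int × Int × Int) : mulE (1, 0, 0, 1) x = x := by
  obtain ⟨a, b, c, d⟩ := x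
  simp only [mulE, Prod.mk.injEq]
  refine ⟨by ring, by ring, by ring, by ring⟩

theorem mulE_one_right (x : Int × Int × Int × Int) : mulE x (1, 0, 0, 1) = x := by
  obtain ⟨a, b, c, d⟩ := x
  simp only [mulE, Prod.mk.injEq]
  refine ⟨by ring, by ring, by ring, by ring⟩

theorem powE_two_mul (p : Int × Int × Int × Int) (k : Nat) :
    powE p (2 * k) = powE (mulE p p) k := by
  induction k with
  | zero => rfl
  | succ k ih =>
      have : 2 * (k + 1) = (2 * k + 1) + 1 := by ring
      rw [this, powE, powE, ih, powE, ← mulE_assoc]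

theorem MC_refl (x : Int × Int × Int × Int) : MC x x :=
  ⟨Int.ModEq.refl _, Int.ModEq.refl _, Int.ModEq.refl _, Int.ModEq.refl _⟩

theorem MC_mul {x x' y y' : Int × Int × Int × Int} (hx : MC x x') (hy : MC y y') :
    MC (mulE x y) (mulE x' y') := by
  obtain ⟨h1, h2, h3, h4⟩ := hx
  obtain ⟨g1, g2, g3, g4⟩ := hy
  exact ⟨(h1.mul g1).add (h2.mul g3), (h1.mul g2).add (h2.mul g4),
         (h3.mul g1).add (h4.mul g3), (h3.mul g2).add (h4.mul g4)⟩

theorem MC_altMul {x x' y y' : Int × Int × Int × Int} (hx : MC x x') (hy : MC y y') :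
    MC (altMul x y) (mulE x' y') := by
  have hm : ∀ a : Int, a % 1000000007 ≡ a [ZMOD 1000000007] :=
    fun a => Int.emod_emod_of_dvd a dvd_rfl
  have := MC_mul hx hy
  obtain ⟨h1, h2, h3, h4⟩ := this
  exact ⟨(hm _).trans h1, (hm _).trans h2, (hm _).trans h3, (hm _).trans h4⟩

theorem altLoop_correct (fuel : Nat) : ∀ (e : Int), e.toNat ≤ fuel →
    ∀ (r' p' r p : Int × Int × Int × Int), MC r' r → MC p' p →
    MC (altLoop r' p' e) (mulE r (powE p e.toNat)) := by
  induction fuel with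
  | zero =>
      intro e he r' p' r p hr hp
      have he0 : ¬ 0 < e := by omega
      rw [altLoop, dif_neg he0]
      have h0 : e.toNat = 0 := by omega
      rw [h0, powE, mulE_one_right]
      exact hr
  | succ fuel ih =>
      intro e he r' p' r p hr hp
      by_cases he0 : 0 < e
      · rw [altLoop, dif_pos he0]
        have hfd : PySem.Int.floordiv e 2 = e / 2 := PySem.Int.floordiv_eq_ediv_of_pos (by omega)
        have hband : PySem.Int.band e 1 = e % 2 :=
          (PySem.Int.band_one e).trans (PySem.Int.mod_eq_emod_of_pos (by norm_num))
        have hle : (e / 2).toNat ≤ fuel := by omega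
        set R : Int × Int × Int × Int := if PySem.Int.band e 1 != 0 then mulE r p else r with hR
        have hmain := ih (e / 2) hle
          (if PySem.Int.band e 1 != 0 then altMul r' p' else r') (altMul p' p')
          R (mulE p p)
          (by
            by_cases hb : PySem.Int.band e 1 != 0
            · rw [hR, if_pos hb, if_pos hb]; exact MC_altMul hr hp
            · rw [hR, if_neg hb, if_neg hb]; exact hr)
          (MC_altMul hp hp)
        rw [hfd]
        have hgoal : mulE R (powE (mulE p p) (e / 2).toNat) = mulE r (powE p e.toNat) := by
          rw [← powE_two_mul]
          by_cases hb : PySem.Int.band e 1 != 0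
          · have hodd : e % 2 = 1 := by
              rw [hband] at hb; simp at hb; omega
            have ht : e.toNat = 2 * (e / 2).toNat + 1 := by omega
            rw [hR, if_pos hb, mulE_assoc, ht, powE]
          · have heven : e % 2 = 0 := by
              rw [hband] at hb; simp at hb; omega
            have ht : e.toNat = 2 * (e / 2).toNat := by omega
            rw [hR, if_neg hb, ht]
        rw [← hgoal]
        exact hmain
      · rw [altLoop, dif_neg he0]
        have h0 : e.toNat = 0 := by omega
        rw [h0, powE, mulE_one_right]
        exact hr

theorem altLoop_nonpos (r p : Int × Int × Int × Int) (e : Int) (h : ¬ 0 < e) :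
    altLoop r p e = r := by rw [altLoop, dif_neg h]

theorem alt_at_nonpos_even (n : Int) (hm : (n % 2 != 0) = false) (hf : ¬ 0 < PySem.Int.floordiv n 2) :
    solution_alt n = 1 := by
  rw [solution_alt, if_neg (by simp_all), altLoop_nonpos _ _ _ hf]
  decide

theorem powE_rows (k : Nat) :
    (powE (4, -1, 1, 0) k).1 * 3 + (powE (4, -1, 1, 0) k).2.1 = F (k + 1) ∧
    (powE (4, -1, 1, 0) k).2.2.1 * 3 + (powE (4, -1, 1, 0) k).2.2.2 = F k := by
  induction k with
  | zero => constructor <;> decide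
  | succ k ih =>
      obtain ⟨h1, h2⟩ := ih
      rw [powE]
      constructor
      · show (4 * (powE (4, -1, 1, 0) k).1 + -1 * (powE (4, -1, 1, 0) k).2.2.1) * 3 +
            (4 * (powE (4, -1, 1, 0) k).2.1 + -1 * (powE (4, -1, 1, 0) k).2.2.2) = F (k + 2)
        have : F (k + 2) = 4 * F (k + 1) - F k := rfl
        rw [this, ← h1, ← h2]; ring
      · show (1 * (powE (4, -1, 1, 0) k).1 + 0 * (powE (4, -1, 1, 0) k).2.2.1) * 3 +
            (1 * (powE (4, -1, 1, 0) k).2.1 + 0 * (powE (4, -1, 1, 0) k).2.2.2) = F (k + 1)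
        rw [← h1]; ring

theorem solB (k : Nat) :
    solution_alt (2 * (k : Int) + 2) = F (k + 1) % 1000000007 := by
  have hmod : (2 * (k : Int) + 2) % 2 = 0 := by omega
  rw [solution_alt, if_neg (by simp [hmod])]
  have hfd : PySem.Int.floordiv (2 * (k : Int) + 2) 2 = (k : Int) + 1 := by
    rw [PySem.Int.floordiv_eq_ediv_of_pos (by norm_num)]; omega
  rw [hfd]
  have htn : ((k : Int) + 1).toNat = k + 1 := by omega
  have hMC := altLoop_correct (k + 1) ((k : Int) + 1) (by omega)
    (1, 0, 0, 1) (4, 1000000007 - 1, 1, 0) (1, 0, 0, 1) (4, -1, 1, 0)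
    (MC_refl _) (by unfold MC; refine ⟨by decide, by decide, by decide, by decide⟩)
  rw [htn, mulE_one_left] at hMC
  obtain ⟨_, _, h3, h4⟩ := hMC
  have hrow := (powE_rows (k + 1)).2
  calc ((altLoop (1, 0, 0, 1) (4, 1000000007 - 1, 1, 0) ((k : Int) + 1)).2.2.1 * 3 +
        (altLoop (1, 0, 0, 1) (4, 1000000007 - 1, 1, 0) ((k : Int) + 1)).2.2.2) % 1000000007
      = ((powE (4, -1, 1, 0) (k + 1)).2.2.1 * 3 + (powE (4, -1, 1, 0) (k + 1)).2.2.2) %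
        1000000007 := (h3.mul_right 3).add h4
    _ = F (k + 1) % 1000000007 := by rw [hrow]

-- ===== VERDICT (by name: the statement is the Claim_ definition above) =====
theorem solution_spec : Claim_unchanged_solution := by
  intro n _ hpre hnd
  by_cases hodd : n % 2 = 1
  · rw [solution, if_pos (by simp [hodd]), solution_alt, if_pos (by simp [hodd])]
  · have heven : n % 2 = 0 := by omega
    have h2 : 2 ≤ n := by
      unfold Pre_solution at hpre
      unfold D_solution at hnd
      omega
    obtain ⟨k, hk⟩ : ∃ k : Nat, n = 2 * (k : Int) + 2 :=
      ⟨((n - 2) / 2).toNat, by omega⟩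
    rw [hk, solA, solB]

theorem solution_changed : Claim_changed_solution := by
  unfold Claim_changed_solution
  refine ⟨by decide, by decide, by decide, by decide, ?_, by decide⟩
  show solution_alt (-2) = 1
  exact alt_at_nonpos_even _ (by decide) (by decide)

theorem solution_tight : Claim_exact_solution := by
  intro n _ _ hD
  unfold D_solution at hD
  rcases hD with h | h <;> subst h <;>
    rw [alt_at_nonpos_even _ (by decide) (by decide)] <;> decide

@[simp] theorem solution_raises : Claim_raises_solution := by
  unfold Claim_raises_solution
  constructor
  · intro n _ hr hp
    unfold Raises_solution at hr
    unfold Pre_solution at hp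
    omega
  · refine ⟨by decide, by decide, ?_⟩
    show solution_alt 0 = 1
    exact alt_at_nonpos_even _ (by decide) (by decide)
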